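-- pv_equiv track=rewrite | github.com/Deriskan/HW | L4_HW/task1.py | la_song
-- ===== SOURCE A (Python) =====
-- def la_song(string_count=3, word_count=3, ending_mark=0) -> str:
--     """
--     This function returns a string that can be separated by "\n" and ends with "." or "!".
--     """
--     assert int(string_count) >= 0 and int(word_count) >= 0, '"Count" arguments are natural numbers only!'
--     assert ending_mark in (0, 1), 'The argument for the end of a string is 0 or 1 only!'
--     lst = []  # Используем список слов для вставки "-" между словами при преобразовании в строку.
--     ending = ['.', '!', '\n']  # Список возможных последних симовлов строки.
--     if string_count == 0 or word_count == 0:  # Если нет ни одной строчки ни одного слова в песне.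
--         return ''
--     else:
--         for i in range(word_count):  # Добавляем все слова в список слов.
--             lst.append('la')
--     return ('-'.join(lst) + f'{ending[2]}') * (string_count - 1) + ('-'.join(lst) + f'{ending[ending_mark]}')
-- ===== SOURCE B (Python) =====
-- def la_song(string_count=3, word_count=3, ending_mark=0) -> str:
--     """
--     This function returns a string that can be separated by "\n" and ends with "." or "!".
--     """
--     assert int(string_count) >= 0 and int(word_count) >= 0, '"Count" arguments are natural numbers only!'
--     assert ending_mark in (0, 1), 'The argument for the end of a string is 0 or 1 only!'
--     if string_count == 0 or word_count == 0:
--         return ''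
--     # Single flat pass over every word of the whole song: after each 'la' emit the
--     # separator chosen by the word's index (no line is ever built or repeated).
--     total = string_count * word_count
--     parts = []
--     for k in range(total):
--         parts.append('la')
--         if k == total - 1:
--             parts.append('.!'[ending_mark])
--         elif k % word_count == word_count - 1:
--             parts.append('\n')
--         else:
--             parts.append('-')
--     return ''.join(parts)
-- ===== Notes on version B (the rewrite author's own statement) =====
-- stated objective: alternative
-- what changed: B never builds a line: it makes one flat pass over all string_count*word_count words of the song, emitting after each 'la' a separator chosen by index arithmetic ('-' inside a line, '\n' at k%word_count==word_count-1, the ending mark at the last word), replacing A's join-one-line-then-string-multiply assembly.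
import Mathlib
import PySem

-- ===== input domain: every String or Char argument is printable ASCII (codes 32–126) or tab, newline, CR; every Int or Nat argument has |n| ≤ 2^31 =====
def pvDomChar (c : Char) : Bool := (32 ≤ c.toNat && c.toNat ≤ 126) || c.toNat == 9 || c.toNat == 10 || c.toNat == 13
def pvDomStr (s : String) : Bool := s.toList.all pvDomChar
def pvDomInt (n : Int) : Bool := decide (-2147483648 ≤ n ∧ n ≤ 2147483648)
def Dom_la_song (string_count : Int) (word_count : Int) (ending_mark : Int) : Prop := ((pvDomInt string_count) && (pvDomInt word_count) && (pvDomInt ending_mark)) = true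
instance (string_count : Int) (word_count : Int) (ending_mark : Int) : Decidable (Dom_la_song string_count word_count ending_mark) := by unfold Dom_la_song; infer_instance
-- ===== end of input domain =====

-- B makes one flat pass over all string_count*word_count words, choosing each word's trailing
-- separator by index arithmetic, instead of A's build-one-line-then-string-multiply assembly.


-- ===== PORT A =====
def la_song (string_count : Int) (word_count : Int) (ending_mark : Int) : String :=
  -- asserts excluded by Pre_la_song
  let ending : List Char := ['.', '!', '\n']
  if string_count == 0 || word_count == 0 then "" else
  -- for i in range(word_count): lst.append('la')
  let lst : List (List Char) :=
    (PySem.List.pyRange 0 word_count 1).foldl (fun l _ => l ++ [['l', 'a']]) []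
  String.ofList (PySem.List.pyRepeat (PySem.Chars.join ['-'] lst ++ ['\n']) (string_count - 1)
    ++ (PySem.Chars.join ['-'] lst ++ [PySem.List.pyGetD ending ending_mark ' ']))

-- ===== PORT B =====
def la_song_alt (string_count : Int) (word_count : Int) (ending_mark : Int) : String :=
  -- asserts excluded by Pre_la_song
  if string_count == 0 || word_count == 0 then "" else
  let total : Int := string_count * word_count
  -- for k in range(total): parts.append('la'); parts.append(separator by index)
  let parts : List (List Char) :=
    (PySem.List.pyRange 0 total 1).foldl (fun ps k =>
      let ps2 := ps ++ [['l', 'a']]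
      if k == total - 1 then ps2 ++ [[PySem.List.pyGetD ['.', '!'] ending_mark ' ']]
      else if PySem.Int.mod k word_count == word_count - 1 then ps2 ++ [['\n']]
      else ps2 ++ [['-']])
      []
  String.ofList (PySem.Chars.join [] parts)

-- ===== PRECONDITION & SPEC =====
-- Pre_ excludes exactly the inputs on which A's two asserts raise AssertionError:
-- a negative count or an ending_mark other than 0/1.
def Pre_la_song (string_count : Int) (word_count : Int) (ending_mark : Int) : Prop :=
  0 ≤ string_count ∧ 0 ≤ word_count ∧ (ending_mark = 0 ∨ ending_mark = 1)
instance (string_count : Int) (word_count : Int) (ending_mark : Int) : Decidable (Pre_la_song string_count word_count ending_mark) := by unfold Pre_la_song; infer_instance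
def pvWitness_la_song : Int × Int × Int := (2, 3, 1)

def Spec_la_song (string_count : Int) (word_count : Int) (ending_mark : Int) (out : String) : Prop := out = la_song_alt string_count word_count ending_mark
instance (string_count : Int) (word_count : Int) (ending_mark : Int) (out : String) : Decidable (Spec_la_song string_count word_count ending_mark out) := by unfold Spec_la_song; infer_instance

-- ===== CLAIM (what is proved, stated in full; the proofs are below) =====
def Claim_equal_la_song : Prop := ∀ (string_count : Int) (word_count : Int) (ending_mark : Int), Dom_la_song string_count word_count ending_mark → Pre_la_song string_count word_count ending_mark → Spec_la_song string_count word_count ending_mark (la_song string_count word_count ending_mark)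

-- ===== LEMMAS AND PROOFS =====

theorem flatMap_congr_mem {α β : Type} (l : List α) (f g : α → List β)
    (h : ∀ x ∈ l, f x = g x) : l.flatMap f = l.flatMap g := by
  induction l with
  | nil => rfl
  | cons x t ih =>
    simp only [List.flatMap_cons]
    rw [h x (by simp), ih (fun y hy => h y (by simp [hy]))]

-- '-'.join(['la']*(n+1)) as n separated words plus a last 'la'
theorem join_rep (n : Nat) :
    PySem.Chars.join ['-'] (List.replicate (n + 1) (['l', 'a'] : List Char)) =
      (List.replicate n (['l', 'a', '-'] : List Char)).flatten ++ ['l', 'a'] := by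
  induction n with
  | zero => simp [PySem.Chars.join, List.intercalate]
  | succ m ih =>
    rw [List.replicate_succ (n := m + 1), List.replicate_succ (n := m),
      PySem.Chars.join_cons_cons, ← List.replicate_succ (n := m), ih,
      List.replicate_succ (n := m)]
    simp

theorem flatMap_const_range {β : Type} (n : Nat) (xs : List β) :
    (List.range n).flatMap (fun _ => xs) = (List.replicate n xs).flatten := by
  induction n with
  | zero => simp
  | succ m ih =>
    rw [List.range_succ, List.flatMap_append, ih, List.replicate_succ' (n := m)]
    simp

-- one line of w = n+1 words with final character c
theorem line_block (n : Nat) (c : Char) :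
    (List.range (n + 1)).flatMap (fun j => ['l', 'a', if j = n then c else '-']) =
      PySem.Chars.join ['-'] (List.replicate (n + 1) (['l', 'a'] : List Char)) ++ [c] := by
  rw [List.range_succ, List.flatMap_append]
  have h1 : ∀ j ∈ List.range n,
      (['l', 'a', if j = n then c else '-'] : List Char) = ['l', 'a', '-'] := by
    intro j hj
    have := List.mem_range.mp hj
    rw [if_neg (by omega)]
  rw [flatMap_congr_mem _ _ _ h1, flatMap_const_range, join_rep]
  simp

-- m full lines, each ending in '\n'
theorem body_lines (w m : Nat) (hw : 1 ≤ w) :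
    (List.range (m * w)).flatMap
        (fun k => ['l', 'a', if k % w = w - 1 then '\n' else '-']) =
      (List.replicate m
        (PySem.Chars.join ['-'] (List.replicate w (['l', 'a'] : List Char)) ++ ['\n'])).flatten := by
  induction m with
  | zero => simp
  | succ p ih =>
    have hsplit : (p + 1) * w = p * w + w := by ring
    rw [hsplit, List.range_add, List.flatMap_append, ih, List.flatMap_map]
    have hcond : ∀ j ∈ List.range w,
        (['l', 'a', if (p * w + j) % w = w - 1 then '\n' else '-'] : List Char)
          = ['l', 'a', if j = w - 1 then '\n' else '-'] := by
      intro j hj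
      have hjw : j < w := List.mem_range.mp hj
      have : (p * w + j) % w = j := by
        rw [Nat.mul_add_mod']  -- hope; else adjust
        exact Nat.mod_eq_of_lt hjw
      rw [this]
    rw [flatMap_congr_mem _ _ _ hcond]
    obtain ⟨n, rfl⟩ : ∃ n, w = n + 1 := ⟨w - 1, by omega⟩
    have := line_block n '\n'
    simp only [Nat.add_sub_cancel] at *
    rw [this]
    rw [List.replicate_succ' (n := p)]
    simp

-- the whole song, Nat level
theorem song_flat (w s : Nat) (hw : 1 ≤ w) (hs : 1 ≤ s) (c : Char) :
    (List.range (s * w)).flatMap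
        (fun k => ['l', 'a',
          if k = s * w - 1 then c else if k % w = w - 1 then '\n' else '-']) =
      (List.replicate (s - 1)
        (PySem.Chars.join ['-'] (List.replicate w (['l', 'a'] : List Char)) ++ ['\n'])).flatten
        ++ PySem.Chars.join ['-'] (List.replicate w (['l', 'a'] : List Char)) ++ [c] := by
  obtain ⟨m, rfl⟩ : ∃ m, s = m + 1 := ⟨s - 1, by omega⟩
  have hsplit : (m + 1) * w = m * w + w := by ring
  rw [hsplit, List.range_add, List.flatMap_append]
  have h1 : ∀ k ∈ List.range (m * w),
      (['l', 'a', if k = m * w + w - 1 then c else if k % w = w - 1 then '\n' else '-'] : List Char)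
        = ['l', 'a', if k % w = w - 1 then '\n' else '-'] := by
    intro k hk
    have hkw : k < m * w := List.mem_range.mp hk
    rw [if_neg (by omega)]
  have h2 : ∀ j ∈ List.range w,
      (['l', 'a', if m * w + j = m * w + w - 1 then c
          else if (m * w + j) % w = w - 1 then '\n' else '-'] : List Char)
        = ['l', 'a', if j = w - 1 then c else '-'] := by
    intro j hj
    have hjw : j < w := List.mem_range.mp hj
    by_cases h : j = w - 1
    · rw [if_pos (by omega), if_pos h]
    · rw [if_neg (by omega)]
      have hmod : (m * w + j) % w = j := by
        rw [Nat.mul_add_mod']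
        exact Nat.mod_eq_of_lt hjw
      rw [hmod, if_neg h, if_neg h]
  rw [flatMap_congr_mem _ _ _ h1]
  rw [List.flatMap_map, flatMap_congr_mem _ _ _ h2]
  rw [body_lines w m hw]
  obtain ⟨n, rfl⟩ : ∃ n, w = n + 1 := ⟨w - 1, by omega⟩
  have := line_block n c
  simp only [Nat.add_sub_cancel] at *
  rw [this]
  simp

-- A's append loop builds word_count copies of "la"
theorem lst_eq (word_count : Int) :
    (PySem.List.pyRange 0 word_count 1).foldl (fun l _ => l ++ [['l', 'a']]) [] =
      List.replicate word_count.toNat (['l', 'a'] : List Char) := by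
  rw [PySem.List.foldl_append_singleton_eq_map, List.map_const']
  simp [PySem.List.length_pyRange_one]

-- B's fold is an extend-by-g loop
theorem parts_eq (T wc em : Int) :
    (PySem.List.pyRange 0 T 1).foldl (fun ps k =>
        let ps2 := ps ++ [['l', 'a']]
        if k == T - 1 then ps2 ++ [[PySem.List.pyGetD ['.', '!'] em ' ']]
        else if PySem.Int.mod k wc == wc - 1 then ps2 ++ [['\n']]
        else ps2 ++ [['-']]) [] =
      (PySem.List.pyRange 0 T 1).flatMap (fun k =>
        [['l', 'a'],
          [if k == T - 1 then PySem.List.pyGetD ['.', '!'] em ' '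
           else if PySem.Int.mod k wc == wc - 1 then '\n' else '-']]) := by
  have hb : (fun (ps : List (List Char)) (k : Int) =>
        let ps2 := ps ++ [['l', 'a']]
        if k == T - 1 then ps2 ++ [[PySem.List.pyGetD ['.', '!'] em ' ']]
        else if PySem.Int.mod k wc == wc - 1 then ps2 ++ [['\n']]
        else ps2 ++ [['-']])
      = (fun ps k => ps ++
          [['l', 'a'],
            [if k == T - 1 then PySem.List.pyGetD ['.', '!'] em ' '
             else if PySem.Int.mod k wc == wc - 1 then '\n' else '-']]) := by
    funext ps k
    by_cases h1 : k == T - 1 <;> by_cases h2 : PySem.Int.mod k wc == wc - 1 <;>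
      simp [h1, h2]
  rw [hb, PySem.List.foldl_append_eq_flatMap]
  simp

theorem flatten_flatMap_pairs {α : Type} {β : Type} (l : List α) (f g : α → List β) :
    (l.flatMap (fun k => [f k, g k])).flatten = l.flatMap (fun k => f k ++ g k) := by
  induction l with
  | nil => rfl
  | cons x t ih => simp [ih]

theorem pyRepeat_flatten {α : Type} (xs : List α) (n : Int) :
    PySem.List.pyRepeat xs n = (List.replicate n.toNat xs).flatten := by
  simp [PySem.List.pyRepeat]

theorem la_song_spec : Claim_equal_la_song := by
  intro sc wc em _ hpre
  obtain ⟨hsc, hwc, hem⟩ := hpre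
  unfold Spec_la_song la_song la_song_alt
  by_cases h : sc == 0 || wc == 0
  · simp [h]
  · simp only [h, Bool.false_eq_true, if_false, lst_eq]
    rw [parts_eq]
    have hsc1 : 1 ≤ sc := by
      simp only [Bool.or_eq_true, beq_iff_eq, not_or] at h; omega
    have hwc1 : 1 ≤ wc := by
      simp only [Bool.or_eq_true, beq_iff_eq, not_or] at h; omega
    -- ''.join is flatten
    have hjoin : ∀ (l : List (List Char)), PySem.Chars.join [] l = l.flatten := by
      intro l
      induction l with
      | nil => rfl
      | cons x t ih =>
        cases t with
        | nil => simp [PySem.Chars.join, List.intercalate]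
        | cons y r =>
          rw [PySem.Chars.join_cons_cons]
          simp only [List.flatten_cons]
          rw [ih]
          simp
    rw [hjoin, flatten_flatMap_pairs]
    -- name the Nat sizes
    obtain ⟨s, rfl⟩ : ∃ s : Nat, sc = (s : Int) := ⟨sc.toNat, by omega⟩
    obtain ⟨w, rfl⟩ : ∃ w : Nat, wc = (w : Int) := ⟨wc.toNat, by omega⟩
    have hs : 1 ≤ s := by exact_mod_cast hsc1
    have hw : 1 ≤ w := by exact_mod_cast hwc1
    have hT : (s : Int) * (w : Int) = ((s * w : Nat) : Int) := by push_cast; ring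
    rw [hT, PySem.List.pyRange_one]
    have hTn : (((s * w : Nat) : Int) - 0).toNat = s * w := by omega
    rw [hTn, List.flatMap_map]
    have hend : PySem.List.pyGetD ['.', '!', '\n'] em ' '
        = PySem.List.pyGetD ['.', '!'] em ' ' := by
      rcases hem with rfl | rfl <;> rfl
    have hcong : ∀ k ∈ List.range (s * w),
        (['l', 'a'] ++
          [if ((0 : Int) + (k : Int)) == ((s * w : Nat) : Int) - 1 then
              PySem.List.pyGetD ['.', '!'] em ' '
            else if PySem.Int.mod ((0 : Int) + (k : Int)) (w : Int) == (w : Int) - 1 then '\n'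
            else '-'] : List Char)
          = ['l', 'a',
              if k = s * w - 1 then PySem.List.pyGetD ['.', '!'] em ' '
              else if k % w = w - 1 then '\n' else '-'] := by
      intro k hk
      have hkb : k < s * w := List.mem_range.mp hk
      have hmod : PySem.Int.mod ((0 : Int) + (k : Int)) (w : Int)
          = ((k % w : Nat) : Int) := by
        rw [zero_add]
        exact PySem.Int.mod_natCast k w
      have hc1 : (((0 : Int) + (k : Int)) == ((s * w : Nat) : Int) - 1)
          = decide (k = s * w - 1) := by
        by_cases hq : k = s * w - 1
        · simp [hq]; omega
        · simp [hq]; omega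
      have hc2 : (PySem.Int.mod ((0 : Int) + (k : Int)) (w : Int) == (w : Int) - 1)
          = decide (k % w = w - 1) := by
        rw [hmod]
        by_cases hq : k % w = w - 1
        · simp [hq]; omega
        · simp [hq]; omega
      rw [hc1, hc2]
      by_cases hq : k = s * w - 1 <;> by_cases hq2 : k % w = w - 1 <;>
        simp [hq, hq2]
    rw [flatMap_congr_mem _ _ _ hcong, song_flat w s hw hs]
    rw [pyRepeat_flatten, hend]
    have hsub : (((s : Int) - 1)).toNat = s - 1 := by omega
    rw [hsub]
    simp
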